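-- pv_equiv track=rewrite | github.com/painebenjamin/fal-blender | endpoints.py | pixels_to_aspect_resolution
-- ===== SOURCE A (Python) =====
-- ASPECT_RATIOS = [
--     "1:1", "16:9", "9:16", "4:3", "3:4", "21:9", "9:21",
--     "3:2", "2:3", "4:5", "5:4", "16:21", "21:16",
-- ]
--
-- RESOLUTION_TIERS = {
--     "0.5K": 512,
--     "1K": 1024,
--     "2K": 2048,
--     "4K": 4096,
-- }
--
-- def pixels_to_aspect_resolution(
--     width: int, height: int
-- ) -> tuple[str, str]:
--     """Convert pixel dimensions to closest aspect ratio + resolution tier."""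
--     target_ratio = width / height
--
--     best_ar = "1:1"
--     best_diff = float("inf")
--     for ar in ASPECT_RATIOS:
--         w, h = map(int, ar.split(":"))
--         diff = abs(target_ratio - w / h)
--         if diff < best_diff:
--             best_diff = diff
--             best_ar = ar
--
--     longest = max(width, height)
--     best_res = "1K"
--     best_res_diff = float("inf")
--     for name, pixels in RESOLUTION_TIERS.items():
--         diff = abs(longest - pixels)
--         if diff < best_res_diff:
--             best_res_diff = diff
--             best_res = name
--
--     return best_ar, best_res
-- ===== SOURCE B (Python) =====
-- ASPECT_RATIOS = [
--     "1:1", "16:9", "9:16", "4:3", "3:4", "21:9", "9:21",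
--     "3:2", "2:3", "4:5", "5:4", "16:21", "21:16",
-- ]
--
-- def pixels_to_aspect_resolution(width, height):
--     # Exact integer arithmetic: for ratio w:h the distance |width/height - w/h|
--     # is proportional to abs(width*h - w*height) * (5040 // h), since 5040 is a
--     # common multiple of all table denominators; min is first-wins like A's loop.
--     def key(ar):
--         w, h = map(int, ar.split(":"))
--         return abs(width * h - w * height) * (5040 // h)
--     best_ar = min(ASPECT_RATIOS, key=key)
--     longest = max(width, height)
--     if longest <= 768:
--         best_res = "0.5K"
--     elif longest <= 1536:
--         best_res = "1K"
--     elif longest <= 3072: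
--         best_res = "2K"
--     else:
--         best_res = "4K"
--     return best_ar, best_res
-- ===== Notes on version B (the rewrite author's own statement) =====
-- stated objective: alternative
-- what changed: Replaces the float-division best-diff scan with an exact integer cross-multiplication key under min(), and replaces the resolution-tier scan with a closed-form threshold chain.
-- outside the precondition, e.g. on pixels_to_aspect_resolution(59, 96): A returns ('2:3', '0.5K'), B returns ('9:16', '0.5K')
import Mathlib
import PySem

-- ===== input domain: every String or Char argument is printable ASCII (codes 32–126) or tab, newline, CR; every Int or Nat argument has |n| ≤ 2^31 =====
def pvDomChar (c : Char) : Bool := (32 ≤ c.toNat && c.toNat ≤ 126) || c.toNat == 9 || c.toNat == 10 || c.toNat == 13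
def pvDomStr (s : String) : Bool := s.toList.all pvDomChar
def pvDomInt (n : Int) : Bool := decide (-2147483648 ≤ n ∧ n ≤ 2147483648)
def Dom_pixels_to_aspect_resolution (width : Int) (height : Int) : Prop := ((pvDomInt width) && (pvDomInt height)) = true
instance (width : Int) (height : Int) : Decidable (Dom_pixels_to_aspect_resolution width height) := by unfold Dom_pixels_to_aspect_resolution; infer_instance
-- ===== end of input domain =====

-- B replaces A's float best-diff scan by an exact integer cross-multiplication key under
-- min() and the resolution-tier scan by a closed-form threshold chain (objective: alternative).

-- ===== PORT A =====
-- module constants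
def pvAspectRatios : List String :=
  ["1:1", "16:9", "9:16", "4:3", "3:4", "21:9", "9:21",
   "3:2", "2:3", "4:5", "5:4", "16:21", "21:16"]
def pvResolutionTiers : List (String × Int) :=
  [("0.5K", 512), ("1K", 1024), ("2K", 2048), ("4K", 4096)]

-- w, h = map(int, ar.split(":"))  — the parse never fails on the table's literals, so getD 0 is unreachable
def pvParseW (ar : String) : Int :=
  (((PySem.Str.split? ar ":").getD []).head?.bind PySem.Int.ofStr?).getD 0
def pvParseH (ar : String) : Int :=
  ((((PySem.Str.split? ar ":").getD []).drop 1).head?.bind PySem.Int.ofStr?).getD 0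

-- one iteration of A's aspect loop; Python's float subtraction/abs/compare are ported with
-- exact rationals (ℚ): exact on Pre_ (height ≠ 0 and no exact distance tie, the only places
-- where float rounding could decide); best_diff = none plays float("inf")
def pvStepA (target : ℚ) (st : String × Option ℚ) (ar : String) : String × Option ℚ :=
  let w := pvParseW ar
  let h := pvParseH ar
  let diff : ℚ := |target - (w : ℚ) / (h : ℚ)|
  match st.2 with
  | none => (ar, some diff)
  | some bd => if diff < bd then (ar, some diff) else st

-- one iteration of A's resolution loop (integer arithmetic, exact)
def pvStepRes (longest : Int) (st : String × Option Int) (nv : String × Int) : String × Option Int :=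
  let diff : Int := |longest - nv.2|
  match st.2 with
  | none => (nv.1, some diff)
  | some bd => if diff < bd then (nv.1, some diff) else st

def pixels_to_aspect_resolution (width : Int) (height : Int) : String × String :=
  let target : ℚ := (width : ℚ) / (height : ℚ)
  let arState := pvAspectRatios.foldl (pvStepA target) ("1:1", none)
  let longest : Int := max width height
  let resState := pvResolutionTiers.foldl (pvStepRes longest) ("1K", none)
  (arState.1, resState.1)

-- ===== PORT B =====
-- Source B's key(ar): abs(width*h - w*height) * (5040 // h)
def pvKeyB (width : Int) (height : Int) (ar : String) : Int :=
  let w := pvParseW ar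
  let h := pvParseH ar
  |width * h - w * height| * PySem.Int.floordiv 5040 h

def pixels_to_aspect_resolution_alt (width : Int) (height : Int) : String × String :=
  -- min(ASPECT_RATIOS, key=key); the list is nonempty so min? is never none
  let best_ar := (PySem.List.min? pvAspectRatios (pvKeyB width height)).getD "1:1"
  let longest : Int := max width height
  let best_res : String :=
    if longest ≤ 768 then "0.5K"
    else if longest ≤ 1536 then "1K"
    else if longest ≤ 3072 then "2K"
    else "4K"
  (best_ar, best_res)

-- ===== PRECONDITION & SPEC =====
-- numerator/denominator of the midpoints of adjacent distinct table ratios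
def pvMidpoints : List (Int × Int) :=
  [(111, 224), (59, 96), (17, 24), (127, 168), (82, 105), (9, 10),
   (9, 8), (41, 32), (127, 96), (17, 12), (59, 36), (37, 18)]

-- Pre_ excludes height = 0, where A raises ZeroDivisionError, and the inputs whose ratio
-- width/height is exactly midway between two adjacent table ratios: there the two closest
-- ratios are exactly tied and A's pick is an accident of float rounding (either answer is
-- as defensible as the other), which the exact-arithmetic B does not reproduce.
def Pre_pixels_to_aspect_resolution (width : Int) (height : Int) : Prop :=
  height ≠ 0 ∧ ∀ pq ∈ pvMidpoints, pq.2 * width ≠ pq.1 * height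
instance (width : Int) (height : Int) : Decidable (Pre_pixels_to_aspect_resolution width height) := by
  unfold Pre_pixels_to_aspect_resolution; infer_instance

def pvWitness_pixels_to_aspect_resolution : Int × Int := (1920, 1080)

def Spec_pixels_to_aspect_resolution (width : Int) (height : Int) (out : String × String) : Prop := out = pixels_to_aspect_resolution_alt width height
instance (width : Int) (height : Int) (out : String × String) : Decidable (Spec_pixels_to_aspect_resolution width height out) := by unfold Spec_pixels_to_aspect_resolution; infer_instance

-- ===== CLAIM (what is proved, stated in full; the proofs are below) =====
def Claim_equal_pixels_to_aspect_resolution : Prop := ∀ (width : Int) (height : Int), Dom_pixels_to_aspect_resolution width height → Pre_pixels_to_aspect_resolution width height → Spec_pixels_to_aspect_resolution width height (pixels_to_aspect_resolution width height)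

-- ===== LEMMAS AND PROOFS =====

-- exact distance used by A's (rational) aspect loop
def pvD (W H : Int) (ar : String) : ℚ :=
  |(W : ℚ) / (H : ℚ) - (pvParseW ar : ℚ) / (pvParseH ar : ℚ)|

-- B's integer key is the exact distance scaled by the positive constant 5040·|H|
theorem pvKey_eq_scaled (W H w h c : Int) (hH : H ≠ 0) (hh : 0 < h) (hc : h * c = 5040) :
    ((|W * h - w * H| * c : Int) : ℚ) = (5040 * |(H : ℚ)|) * |(W : ℚ) / (H : ℚ) - (w : ℚ) / (h : ℚ)| := by
  have hHQ : (H : ℚ) ≠ 0 := Int.cast_ne_zero.mpr hH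
  have hhQ : (0 : ℚ) < (h : ℚ) := by exact_mod_cast hh
  have h1 : (W : ℚ) / (H : ℚ) - (w : ℚ) / (h : ℚ) = ((W * h - w * H : Int) : ℚ) / ((h : ℚ) * (H : ℚ)) := by
    push_cast
    field_simp
  rw [h1, abs_div, abs_mul, abs_of_pos hhQ]
  have hcQ : (h : ℚ) * (c : ℚ) = 5040 := by exact_mod_cast hc
  push_cast
  have hHabs : (0 : ℚ) < |(H : ℚ)| := abs_pos.mpr hHQ
  rw [← hcQ]
  field_simp

theorem pvGood : ∀ ar ∈ pvAspectRatios,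
    0 < pvParseH ar ∧ pvParseH ar * PySem.Int.floordiv 5040 (pvParseH ar) = 5040 := by decide

theorem pvKeyD (W H : Int) (hH : H ≠ 0) (ar : String) (har : ar ∈ pvAspectRatios) :
    ((pvKeyB W H ar : Int) : ℚ) = (5040 * |(H : ℚ)|) * pvD W H ar := by
  obtain ⟨hpos, hmul⟩ := pvGood ar har
  exact pvKey_eq_scaled W H (pvParseW ar) (pvParseH ar) _ hH hpos hmul

-- peeling one comparison off Source B's min()
theorem pvMinCons (key : String → Int) (m x : String) (t : List String) :
    PySem.List.min? (m :: x :: t) key =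
    PySem.List.min? ((if key x < key m then x else m) :: t) key := by
  simp only [PySem.List.min?, List.foldl_cons]
  by_cases h : key x < key m <;> simp [h]

-- A's loop and B's min() select the same element: the stored best_diff always equals
-- the exact distance of the stored best, and every comparison agrees after scaling
theorem pvLoop (W H : Int) (hH : H ≠ 0) :
    ∀ (l : List String), (∀ x ∈ l, x ∈ pvAspectRatios) → ∀ (m : String), m ∈ pvAspectRatios →
      (l.foldl (pvStepA ((W : ℚ) / (H : ℚ))) (m, some (pvD W H m))).1 =
      (PySem.List.min? (m :: l) (pvKeyB W H)).getD "1:1" := by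
  intro l
  induction l with
  | nil => intro _ m _; rfl
  | cons x t ih =>
    intro hsub m hm
    have hx : x ∈ pvAspectRatios := hsub x List.mem_cons_self
    have ht : ∀ y ∈ t, y ∈ pvAspectRatios := fun y hy => hsub y (List.mem_cons_of_mem _ hy)
    have hcpos : (0 : ℚ) < 5040 * |(H : ℚ)| := by
      have : (H : ℚ) ≠ 0 := Int.cast_ne_zero.mpr hH
      positivity
    have hiff : pvD W H x < pvD W H m ↔ pvKeyB W H x < pvKeyB W H m := by
      rw [← Int.cast_lt (R := ℚ), pvKeyD W H hH x hx, pvKeyD W H hH m hm]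
      constructor
      · intro h'; exact (mul_lt_mul_of_pos_left h' hcpos)
      · intro h'; exact lt_of_mul_lt_mul_left h' (le_of_lt hcpos)
    rw [List.foldl_cons, pvMinCons]
    have hstep : pvStepA ((W : ℚ) / (H : ℚ)) (m, some (pvD W H m)) x =
        if pvD W H x < pvD W H m then (x, some (pvD W H x)) else (m, some (pvD W H m)) := rfl
    rw [hstep]
    by_cases h : pvKeyB W H x < pvKeyB W H m
    · rw [if_pos (hiff.mpr h), if_pos h]
      exact ih ht x hx
    · rw [if_neg (fun hc => h (hiff.mp hc)), if_neg h]
      exact ih ht m hm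

theorem pvAspect_eq (W H : Int) (hH : H ≠ 0) :
    (pvAspectRatios.foldl (pvStepA ((W : ℚ) / (H : ℚ))) ("1:1", none)).1 =
    (PySem.List.min? pvAspectRatios (pvKeyB W H)).getD "1:1" := by
  have h1 : ("1:1" : String) ∈ pvAspectRatios := by decide
  have hsub : ∀ x ∈ ["16:9", "9:16", "4:3", "3:4", "21:9", "9:21",
      "3:2", "2:3", "4:5", "5:4", "16:21", "21:16"], x ∈ pvAspectRatios := by decide
  have hfold : pvAspectRatios.foldl (pvStepA ((W : ℚ) / (H : ℚ))) ("1:1", none) =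
      List.foldl (pvStepA ((W : ℚ) / (H : ℚ))) ("1:1", some (pvD W H "1:1"))
        ["16:9", "9:16", "4:3", "3:4", "21:9", "9:21",
         "3:2", "2:3", "4:5", "5:4", "16:21", "21:16"] := rfl
  rw [hfold]
  exact pvLoop W H hH _ hsub "1:1" h1

theorem pvRes_eq (L : Int) :
    (pvResolutionTiers.foldl (pvStepRes L) ("1K", none)).1 =
    (if L ≤ 768 then "0.5K" else if L ≤ 1536 then "1K" else if L ≤ 3072 then "2K" else "4K") := by
  by_cases h1 : L ≤ 768
  · have c1 : ¬ (|L - 1024| < |L - 512|) := by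
      rcases abs_cases (L - 1024) with ⟨e, _⟩ | ⟨e, _⟩ <;>
        rcases abs_cases (L - 512) with ⟨f, _⟩ | ⟨f, _⟩ <;> omega
    have c2 : ¬ (|L - 2048| < |L - 512|) := by
      rcases abs_cases (L - 2048) with ⟨e, _⟩ | ⟨e, _⟩ <;>
        rcases abs_cases (L - 512) with ⟨f, _⟩ | ⟨f, _⟩ <;> omega
    have c3 : ¬ (|L - 4096| < |L - 512|) := by
      rcases abs_cases (L - 4096) with ⟨e, _⟩ | ⟨e, _⟩ <;>
        rcases abs_cases (L - 512) with ⟨f, _⟩ | ⟨f, _⟩ <;> omega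
    simp [pvResolutionTiers, pvStepRes, c1, c2, c3, h1]
  · by_cases h2 : L ≤ 1536
    · have c1 : |L - 1024| < |L - 512| := by
        rcases abs_cases (L - 1024) with ⟨e, _⟩ | ⟨e, _⟩ <;>
          rcases abs_cases (L - 512) with ⟨f, _⟩ | ⟨f, _⟩ <;> omega
      have c2 : ¬ (|L - 2048| < |L - 1024|) := by
        rcases abs_cases (L - 2048) with ⟨e, _⟩ | ⟨e, _⟩ <;>
          rcases abs_cases (L - 1024) with ⟨f, _⟩ | ⟨f, _⟩ <;> omega
      have c3 : ¬ (|L - 4096| < |L - 1024|) := by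
        rcases abs_cases (L - 4096) with ⟨e, _⟩ | ⟨e, _⟩ <;>
          rcases abs_cases (L - 1024) with ⟨f, _⟩ | ⟨f, _⟩ <;> omega
      simp [pvResolutionTiers, pvStepRes, c1, c2, c3, h1, h2]
    · by_cases h3 : L ≤ 3072
      · have c1 : |L - 1024| < |L - 512| := by
          rcases abs_cases (L - 1024) with ⟨e, _⟩ | ⟨e, _⟩ <;>
            rcases abs_cases (L - 512) with ⟨f, _⟩ | ⟨f, _⟩ <;> omega
        have c2 : |L - 2048| < |L - 1024| := by
          rcases abs_cases (L - 2048) with ⟨e, _⟩ | ⟨e, _⟩ <;>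
            rcases abs_cases (L - 1024) with ⟨f, _⟩ | ⟨f, _⟩ <;> omega
        have c3 : ¬ (|L - 4096| < |L - 2048|) := by
          rcases abs_cases (L - 4096) with ⟨e, _⟩ | ⟨e, _⟩ <;>
            rcases abs_cases (L - 2048) with ⟨f, _⟩ | ⟨f, _⟩ <;> omega
        simp [pvResolutionTiers, pvStepRes, c1, c2, c3, h1, h2, h3]
      · have c1 : |L - 1024| < |L - 512| := by
          rcases abs_cases (L - 1024) with ⟨e, _⟩ | ⟨e, _⟩ <;>
            rcases abs_cases (L - 512) with ⟨f, _⟩ | ⟨f, _⟩ <;> omega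
        have c2 : |L - 2048| < |L - 1024| := by
          rcases abs_cases (L - 2048) with ⟨e, _⟩ | ⟨e, _⟩ <;>
            rcases abs_cases (L - 1024) with ⟨f, _⟩ | ⟨f, _⟩ <;> omega
        have c3 : |L - 4096| < |L - 2048| := by
          rcases abs_cases (L - 4096) with ⟨e, _⟩ | ⟨e, _⟩ <;>
            rcases abs_cases (L - 2048) with ⟨f, _⟩ | ⟨f, _⟩ <;> omega
        simp [pvResolutionTiers, pvStepRes, c1, c2, c3, h1, h2, h3]

-- ===== VERDICT (by name: the statement is the Claim_ definition above) =====
theorem pixels_to_aspect_resolution_spec : Claim_equal_pixels_to_aspect_resolution := by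
  intro W H _ hPre
  obtain ⟨hH, _⟩ := hPre
  unfold Spec_pixels_to_aspect_resolution pixels_to_aspect_resolution pixels_to_aspect_resolution_alt
  exact Prod.ext (pvAspect_eq W H hH) (pvRes_eq (max W H))
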